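-- pv_equiv track=rewrite | github.com/DoubleJONY/KDJ-algorithm-challenge | heoh/programmers-42860.py | find_all_a_sequences
-- ===== SOURCE A (Python) =====
-- LEFT = 0
--
-- RIGHT = 1
--
-- def find_all_a_sequences(name: str):
--     n = len(name)
--     a_sequences = []
--     left = 0
--     while left < n:
--         if name[left] == 'A':
--             right = left + 1
--             while right < n and name[right] == 'A':
--                 right += 1
--             right -= 1
--             a_seq = (left, right)
--
--             a_sequences.append(a_seq)
--
--             left = right + 1
--         else:
--             left += 1
--
--     first_seq = a_sequences[0]
--     last_seq = a_sequences[-1]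
--     if first_seq != last_seq:
--         if first_seq[LEFT] == 0 and last_seq[RIGHT] == (n - 1):
--             merged_seq = (last_seq[LEFT], first_seq[RIGHT])
--             a_sequences.pop()
--             a_sequences[0] = merged_seq
--
--     return a_sequences
-- ===== SOURCE B (Python) =====
-- def find_all_a_sequences(name: str):
--     # boundary detection: collect the indices where an 'A' run starts (an 'A'
--     # with no 'A' before it) and where one ends (an 'A' with no 'A' after it),
--     # then zip the two boundary lists into the run pairs; same wraparound merge.
--     n = len(name)
--     starts = [i for i in range(n) if name[i] == 'A' and (i == 0 or name[i-1] != 'A')]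
--     ends = [i for i in range(n) if name[i] == 'A' and (i == n-1 or name[i+1] != 'A')]
--     runs = list(zip(starts, ends))
--     if len(runs) >= 2 and runs[0][0] == 0 and runs[-1][1] == n - 1:
--         last = runs.pop()
--         runs[0] = (last[0], runs[0][1])
--     return runs
-- ===== Notes on version B (the rewrite author's own statement) =====
-- stated objective: alternative
-- what changed: Replaces A's nested-while run scan with boundary detection: two range comprehensions collect run-start indices ('A' with no 'A' before) and run-end indices ('A' with no 'A' after), zipped into the run pairs; the wraparound merge is expressed as a len>=2 guard.
import Mathlib
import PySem

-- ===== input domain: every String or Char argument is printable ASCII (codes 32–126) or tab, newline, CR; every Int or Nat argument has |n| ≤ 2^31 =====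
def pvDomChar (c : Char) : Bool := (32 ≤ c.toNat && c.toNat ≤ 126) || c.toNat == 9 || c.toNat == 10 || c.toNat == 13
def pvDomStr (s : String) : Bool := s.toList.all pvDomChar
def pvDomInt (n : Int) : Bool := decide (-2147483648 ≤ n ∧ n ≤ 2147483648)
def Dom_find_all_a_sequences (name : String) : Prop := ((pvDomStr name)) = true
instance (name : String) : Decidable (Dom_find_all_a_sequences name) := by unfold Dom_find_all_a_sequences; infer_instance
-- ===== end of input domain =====

-- B replaces A's nested-while run scan by boundary detection: two comprehensions
-- collect run-start and run-end indices and are zipped into the run pairs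
-- (objective: alternative); return value only, neither version mutates its argument.

-- ===== PORT A =====
-- inner while: `while right < n and name[right] == 'A': right += 1`
def pvInnerA (s : List Char) (r : Nat) : Nat :=
  if h : r < s.length then
    if s[r] = 'A' then pvInnerA s (r + 1) else r
  else r
termination_by s.length - r

theorem pvInnerA_ge (s : List Char) (r : Nat) : r ≤ pvInnerA s r := by
  unfold pvInnerA
  split
  · split
    · exact le_trans (Nat.le_succ r) (pvInnerA_ge s (r + 1))
    · exact le_refl r
  · exact le_refl r
termination_by s.length - r

-- outer while over `left`, appending each run (left, right) to the accumulator
def pvOuterA (s : List Char) (left : Nat) (acc : List (Int × Int)) : List (Int × Int) :=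
  if h : left < s.length then
    if s[left] = 'A' then
      let right := pvInnerA s (left + 1) - 1
      pvOuterA s (right + 1) (acc ++ [((left : Int), (right : Int))])
    else pvOuterA s (left + 1) acc
  else acc
termination_by s.length - left
decreasing_by
  · have := pvInnerA_ge s (left + 1); omega
  · omega

def find_all_a_sequences (name : String) : List (Int × Int) :=
  let s := name.toList
  let n := s.length
  let a_sequences := pvOuterA s 0 []
  match PySem.List.pyGet? a_sequences 0, PySem.List.pyGet? a_sequences (-1) with
  | some first_seq, some last_seq =>
    if first_seq ≠ last_seq then
      if first_seq.1 = 0 ∧ last_seq.2 = (n : Int) - 1 then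
        -- a_sequences.pop() removes the last element; a_sequences[0] = merged_seq
        (last_seq.1, first_seq.2) :: (a_sequences.dropLast.drop 1)
      else a_sequences
    else a_sequences
  | _, _ => []  -- Python raises IndexError on the empty run list; excluded by Pre_

-- ===== PORT B =====
-- `name[i] == 'A' and (i == 0 or name[i-1] != 'A')`; the indices i, i-1 touched are
-- always in range in Python, so List.getD is exact here
def pvStartB (s : List Char) (i : Nat) : Bool :=
  (s.getD i ' ' == 'A') && (i == 0 || s.getD (i - 1) ' ' != 'A')

-- `name[i] == 'A' and (i == n-1 or name[i+1] != 'A')`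
def pvEndB (s : List Char) (i : Nat) : Bool :=
  (s.getD i ' ' == 'A') && (i == s.length - 1 || s.getD (i + 1) ' ' != 'A')

def find_all_a_sequences_alt (name : String) : List (Int × Int) :=
  let s := name.toList
  let n := s.length
  let starts := (List.range n).filter (pvStartB s)
  let ends := (List.range n).filter (pvEndB s)
  let runs : List (Int × Int) := (starts.zip ends).map (fun p => ((p.1 : Int), (p.2 : Int)))
  if 2 ≤ runs.length ∧ (runs.headD (0, 0)).1 = 0 ∧
      (runs.getLastD (0, 0)).2 = (n : Int) - 1 then
    -- runs.pop(); runs[0] = (last[0], runs[0][1])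
    match runs with
    | first :: rest => ((runs.getLastD (0, 0)).1, first.2) :: rest.dropLast
    | [] => []
  else runs

-- ===== PRECONDITION & SPEC =====
-- Pre_ excludes exactly the strings in which the letter A never occurs: on those the run
-- list is empty and Python A's `a_sequences[0]` raises IndexError.
def Pre_find_all_a_sequences (name : String) : Prop := 'A' ∈ name.toList
instance (name : String) : Decidable (Pre_find_all_a_sequences name) := by
  unfold Pre_find_all_a_sequences; infer_instance

def pvWitness_find_all_a_sequences : String := "AABAA"

def Spec_find_all_a_sequences (name : String) (out : List (Int × Int)) : Prop :=
  out = find_all_a_sequences_alt name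
instance (name : String) (out : List (Int × Int)) :
    Decidable (Spec_find_all_a_sequences name out) := by
  unfold Spec_find_all_a_sequences; infer_instance

-- ===== CLAIM (what is proved, stated in full; the proofs are below) =====
def Claim_equal_find_all_a_sequences : Prop :=
  ∀ (name : String), Dom_find_all_a_sequences name → Pre_find_all_a_sequences name →
    Spec_find_all_a_sequences name (find_all_a_sequences name)

-- ===== LEMMAS AND PROOFS =====

-- reference single-scan form used only as proof middleware between the two ports
def pvBgo (t : List Char) (i : Int) (runs : List (Int × Int)) (start : Option Int) :
    List (Int × Int) :=
  match t with
  | [] => match start with | none => runs | some a => runs ++ [(a, i - 1)]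
  | c :: t' =>
    if c = 'A' then
      pvBgo t' (i + 1) runs (match start with | none => some i | some a => some a)
    else
      pvBgo t' (i + 1) (match start with | none => runs | some a => runs ++ [(a, i - 1)]) none

theorem pvBgo_acc (t : List Char) (i : Int) (runs : List (Int × Int))
    (start : Option Int) : pvBgo t i runs start = runs ++ pvBgo t i [] start := by
  induction t generalizing i runs start with
  | nil => cases start <;> simp [pvBgo]
  | cons c t' ih =>
    by_cases hc : c = 'A'
    · cases start with
      | none =>
        simp only [pvBgo, if_pos hc]
        exact ih (i + 1) runs (some i)
      | some a =>
        simp only [pvBgo, if_pos hc]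
        exact ih (i + 1) runs (some a)
    · cases start with
      | none =>
        simp only [pvBgo, if_neg hc]
        exact ih (i + 1) runs none
      | some a =>
        simp only [pvBgo, if_neg hc]
        rw [ih (i + 1) (runs ++ [(a, i - 1)]) none, ih (i + 1) ([] ++ [(a, i - 1)]) none]
        simp

theorem pvInnerA_le (s : List Char) (r : Nat) (h : r ≤ s.length) :
    pvInnerA s r ≤ s.length := by
  unfold pvInnerA
  split
  · split
    · exact pvInnerA_le s (r + 1) (by omega)
    · exact h
  · exact h
termination_by s.length - r

-- every position the inner while steps over holds an 'A'
theorem pvInnerA_all (s : List Char) (r j : Nat) (h1 : r ≤ j) (h2 : j < pvInnerA s r) :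
    s.getD j ' ' = 'A' := by
  rw [pvInnerA] at h2
  split at h2
  · split at h2
    · by_cases hj : j = r
      · subst hj
        rw [List.getD_eq_getElem s ' ' (by assumption)]
        assumption
      · exact pvInnerA_all s (r + 1) j (by omega) h2
    · omega
  · omega
termination_by s.length - r

-- the inner while stops at the end of the string or at a non-'A'
theorem pvInnerA_stop (s : List Char) (r : Nat) (h : r ≤ s.length) :
    pvInnerA s r = s.length ∨ s.getD (pvInnerA s r) ' ' ≠ 'A' := by
  rw [pvInnerA]
  split
  · split
    · exact pvInnerA_stop s (r + 1) (by omega)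
    · right
      rw [List.getD_eq_getElem s ' ' (by assumption)]
      assumption
  · left; omega
termination_by s.length - r

-- while the scan sits inside a run started at `a`, pvBgo jumps to the end of the run
theorem pvBgo_run (s : List Char) (k : Nat) (hk : k ≤ s.length) (a : Int)
    (runs : List (Int × Int)) :
    pvBgo (s.drop k) (k : Int) runs (some a) =
      pvBgo (s.drop (pvInnerA s k)) ((pvInnerA s k : Nat) : Int)
        (runs ++ [(a, ((pvInnerA s k : Nat) : Int) - 1)]) none := by
  by_cases h : k < s.length
  · by_cases hA : s[k] = 'A'
    · have hin : pvInnerA s k = pvInnerA s (k + 1) := by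
        rw [pvInnerA]; simp [h, hA]
      rw [List.drop_eq_getElem_cons h, hin]
      rw [show pvBgo (s[k] :: s.drop (k + 1)) (k : Int) runs (some a) =
          pvBgo (s.drop (k + 1)) ((k : Int) + 1) runs (some a) by simp [pvBgo, hA]]
      rw [show (k : Int) + 1 = ((k + 1 : Nat) : Int) by push_cast; ring]
      exact pvBgo_run s (k + 1) (by omega) a runs
    · have hin : pvInnerA s k = k := by rw [pvInnerA]; simp [h, hA]
      rw [hin, List.drop_eq_getElem_cons h]
      rw [show pvBgo (s[k] :: s.drop (k + 1)) (k : Int) runs (some a) =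
          pvBgo (s.drop (k + 1)) ((k : Int) + 1) (runs ++ [(a, (k : Int) - 1)]) none by
            simp [pvBgo, hA]]
      rw [show pvBgo (s[k] :: s.drop (k + 1)) (k : Int) (runs ++ [(a, (k : Int) - 1)])
          none = pvBgo (s.drop (k + 1)) ((k : Int) + 1) (runs ++ [(a, (k : Int) - 1)])
          none by simp [pvBgo, hA]]
  · have hkk : k = s.length := by omega
    have hin : pvInnerA s k = k := by rw [pvInnerA]; simp [h]
    rw [hin]
    simp [hkk, List.drop_length, pvBgo]
termination_by s.length - k
decreasing_by omega

-- A's outer loop computes the single scan of the remaining suffix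
theorem pvOuterA_eq_bgo (s : List Char) (k : Nat) (acc : List (Int × Int))
    (hk : k ≤ s.length) :
    pvOuterA s k acc = acc ++ pvBgo (s.drop k) (k : Int) [] none := by
  by_cases h : k < s.length
  · by_cases hA : s[k] = 'A'
    · rw [pvOuterA]
      simp only [h, hA, dif_pos, if_pos]
      have hge := pvInnerA_ge s (k + 1)
      have hle := pvInnerA_le s (k + 1) (by omega)
      have hr1 : pvInnerA s (k + 1) - 1 + 1 = pvInnerA s (k + 1) := by omega
      rw [hr1, pvOuterA_eq_bgo s (pvInnerA s (k + 1)) _ (by omega)]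
      rw [List.drop_eq_getElem_cons h]
      rw [show pvBgo (s[k] :: s.drop (k + 1)) (k : Int) [] none =
          pvBgo (s.drop (k + 1)) ((k : Int) + 1) [] (some (k : Int)) by
            simp [pvBgo, hA]]
      rw [show (k : Int) + 1 = ((k + 1 : Nat) : Int) by push_cast; ring,
        pvBgo_run s (k + 1) (by omega) (k : Int) []]
      rw [pvBgo_acc _ _ ([] ++ [((k : Int), ((pvInnerA s (k + 1) : Nat) : Int) - 1)])]
      have harr : ((pvInnerA s (k + 1) - 1 : Nat) : Int) =
          ((pvInnerA s (k + 1) : Nat) : Int) - 1 := by omega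
      rw [harr]
      simp [List.append_assoc]
    · rw [pvOuterA]
      simp only [h, hA, dif_pos, if_neg, not_false_iff]
      rw [pvOuterA_eq_bgo s (k + 1) acc (by omega)]
      rw [List.drop_eq_getElem_cons h]
      rw [show pvBgo (s[k] :: s.drop (k + 1)) (k : Int) [] none =
          pvBgo (s.drop (k + 1)) ((k : Int) + 1) [] none by simp [pvBgo, hA]]
      rw [show (k : Int) + 1 = ((k + 1 : Nat) : Int) by push_cast; ring]
  · have hkk : k = s.length := by omega
    rw [pvOuterA]
    simp [hkk, List.drop_length, pvBgo]
termination_by s.length - k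
decreasing_by
  all_goals omega

-- every run produced from position k starts at index ≥ k
theorem pvBgo_mem_ge (s : List Char) (k : Nat) (hk : k ≤ s.length) (p : Int × Int)
    (hp : p ∈ pvBgo (s.drop k) (k : Int) [] none) : (k : Int) ≤ p.1 := by
  by_cases h : k < s.length
  · by_cases hA : s[k] = 'A'
    · rw [List.drop_eq_getElem_cons h] at hp
      rw [show pvBgo (s[k] :: s.drop (k + 1)) (k : Int) [] none =
          pvBgo (s.drop (k + 1)) ((k : Int) + 1) [] (some (k : Int)) by
            simp [pvBgo, hA]] at hp
      rw [show (k : Int) + 1 = ((k + 1 : Nat) : Int) by push_cast; ring,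
        pvBgo_run s (k + 1) (by omega) (k : Int) [], pvBgo_acc] at hp
      have hge := pvInnerA_ge s (k + 1)
      have hle := pvInnerA_le s (k + 1) (by omega)
      simp only [List.nil_append, List.mem_append, List.mem_singleton] at hp
      rcases hp with hp | hp
      · rw [hp]
      · have h2 := pvBgo_mem_ge s (pvInnerA s (k + 1)) (by omega) p hp
        push_cast at h2 ⊢
        omega
    · rw [List.drop_eq_getElem_cons h] at hp
      rw [show pvBgo (s[k] :: s.drop (k + 1)) (k : Int) [] none =
          pvBgo (s.drop (k + 1)) ((k : Int) + 1) [] none by simp [pvBgo, hA]] at hp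
      rw [show (k : Int) + 1 = ((k + 1 : Nat) : Int) by push_cast; ring] at hp
      have h2 := pvBgo_mem_ge s (k + 1) (by omega) p hp
      omega
  · have hkk : k = s.length := by omega
    rw [hkk, List.drop_length] at hp
    simp [pvBgo] at hp
termination_by s.length - k
decreasing_by
  all_goals omega

-- structure of the run list from position k: empty, or a head run followed by later runs
theorem pvBgo_structure (s : List Char) (k : Nat) (hk : k ≤ s.length) :
    pvBgo (s.drop k) (k : Int) [] none = [] ∨
    ∃ a b rest, pvBgo (s.drop k) (k : Int) [] none = (a, b) :: rest ∧ a ≤ b ∧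
      ∀ p ∈ rest, b < p.1 := by
  by_cases h : k < s.length
  · by_cases hA : s[k] = 'A'
    · right
      rw [List.drop_eq_getElem_cons h]
      rw [show pvBgo (s[k] :: s.drop (k + 1)) (k : Int) [] none =
          pvBgo (s.drop (k + 1)) ((k : Int) + 1) [] (some (k : Int)) by
            simp [pvBgo, hA]]
      rw [show (k : Int) + 1 = ((k + 1 : Nat) : Int) by push_cast; ring,
        pvBgo_run s (k + 1) (by omega) (k : Int) [], pvBgo_acc]
      have hge := pvInnerA_ge s (k + 1)
      have hle := pvInnerA_le s (k + 1) (by omega)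
      refine ⟨(k : Int), ((pvInnerA s (k + 1) : Nat) : Int) - 1,
        pvBgo (s.drop (pvInnerA s (k + 1))) ((pvInnerA s (k + 1) : Nat) : Int) [] none,
        by simp, ?_, ?_⟩
      · omega
      · intro p hp
        have h2 := pvBgo_mem_ge s (pvInnerA s (k + 1)) (by omega) p hp
        push_cast at h2 ⊢
        omega
    · rw [List.drop_eq_getElem_cons h]
      rw [show pvBgo (s[k] :: s.drop (k + 1)) (k : Int) [] none =
          pvBgo (s.drop (k + 1)) ((k : Int) + 1) [] none by simp [pvBgo, hA]]
      rw [show (k : Int) + 1 = ((k + 1 : Nat) : Int) by push_cast; ring]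
      exact pvBgo_structure s (k + 1) (by omega)
  · left
    have hkk : k = s.length := by omega
    rw [hkk, List.drop_length]
    simp [pvBgo]
termination_by s.length - k
decreasing_by
  all_goals omega

-- no run-start inside the interior of an 'A' block
theorem pvStart_nil (s : List Char) (a c : Nat) (ha : 1 ≤ a)
    (hA : ∀ j, a - 1 ≤ j → j < a + c → s.getD j ' ' = 'A') :
    (List.range' a c).filter (pvStartB s) = [] := by
  rw [List.filter_eq_nil_iff]
  intro j hj
  rw [List.mem_range'_1] at hj
  have h1 : s.getD (j - 1) ' ' = 'A' := hA (j - 1) (by omega) (by omega)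
  simp only [pvStartB, Bool.and_eq_true, Bool.or_eq_true, beq_iff_eq, bne_iff_ne, ne_eq,
    not_and, not_or]
  intro _
  exact ⟨by omega, not_not_intro h1⟩

-- no run-end strictly before the end of an 'A' block
theorem pvEnd_nil (s : List Char) (a c : Nat) (hub : a + c < s.length)
    (hA : ∀ j, a ≤ j → j < a + c + 1 → s.getD j ' ' = 'A') :
    (List.range' a c).filter (pvEndB s) = [] := by
  rw [List.filter_eq_nil_iff]
  intro j hj
  rw [List.mem_range'_1] at hj
  have h1 : s.getD (j + 1) ' ' = 'A' := hA (j + 1) (by omega) (by omega)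
  simp only [pvEndB, Bool.and_eq_true, Bool.or_eq_true, beq_iff_eq, bne_iff_ne, ne_eq,
    not_and, not_or]
  intro _
  exact ⟨by omega, not_not_intro h1⟩

-- A's outer loop equals the zip of the boundary filters on the remaining range
theorem pvOuterA_eq_zip (s : List Char) (k : Nat) (hk : k ≤ s.length)
    (hpre : k = s.length ∨ s.getD k ' ' ≠ 'A' ∨ k = 0 ∨ s.getD (k - 1) ' ' ≠ 'A') :
    pvOuterA s k [] =
      ((((List.range' k (s.length - k)).filter (pvStartB s)).zip
        ((List.range' k (s.length - k)).filter (pvEndB s))).map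
          (fun p => ((p.1 : Int), (p.2 : Int)))) := by
  by_cases h : k < s.length
  · have hget : s.getD k ' ' = s[k] := List.getD_eq_getElem s ' ' h
    by_cases hA : s[k] = 'A'
    · -- start of a run at k; it extends to m - 1 where m = pvInnerA s (k+1)
      have hb : k = 0 ∨ s.getD (k - 1) ' ' ≠ 'A' := by
        rcases hpre with h1 | h1 | h1 | h1
        · omega
        · rw [hget] at h1; exact absurd hA h1
        · exact Or.inl h1
        · exact Or.inr h1
      rw [pvOuterA]
      simp only [h, hA, dif_pos, if_pos]
      have hge : k + 1 ≤ pvInnerA s (k + 1) := pvInnerA_ge s (k + 1)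
      have hle : pvInnerA s (k + 1) ≤ s.length := pvInnerA_le s (k + 1) (by omega)
      have hall : ∀ j, k ≤ j → j < pvInnerA s (k + 1) → s.getD j ' ' = 'A' := by
        intro j hj1 hj2
        by_cases hjk : j = k
        · rw [hjk, hget]; exact hA
        · exact pvInnerA_all s (k + 1) j (by omega) hj2
      have hstop : pvInnerA s (k + 1) = s.length ∨
          s.getD (pvInnerA s (k + 1)) ' ' ≠ 'A' := pvInnerA_stop s (k + 1) (by omega)
      set m := pvInnerA s (k + 1) with hm
      clear_value m
      have hsplit : List.range' k (s.length - k) =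
          List.range' k (m - k) ++ List.range' m (s.length - m) := by
        have hap := List.range'_append (s := k) (m := m - k) (n := s.length - m) (step := 1)
        rw [show k + 1 * (m - k) = m by omega] at hap
        rw [hap, show (m - k) + (s.length - m) = s.length - k by omega]
      have hS : (List.range' k (m - k)).filter (pvStartB s) = [k] := by
        rw [show m - k = 1 + (m - (k + 1)) by omega, ← List.range'_append]
        rw [List.filter_append]
        have hk1 : pvStartB s k = true := by
          unfold pvStartB
          rcases hb with hb | hb
          · subst hb; rw [hget, hA]; simp
          · rw [hget, hA]
            simp only [beq_self_eq_true, Bool.true_and, Bool.or_eq_true, beq_iff_eq,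
              bne_iff_ne, ne_eq]
            exact Or.inr hb
        rw [show k + 1 * 1 = k + 1 by omega,
          pvStart_nil s (k + 1) (m - (k + 1)) (by omega)
            (fun j hj1 hj2 => hall j (by omega) (by omega))]
        simp [List.range', hk1]
      have hE : (List.range' k (m - k)).filter (pvEndB s) = [m - 1] := by
        rw [show m - k = (m - 1 - k) + 1 by omega, ← List.range'_append]
        rw [List.filter_append]
        rw [pvEnd_nil s k (m - 1 - k) (by omega)
          (fun j hj1 hj2 => hall j (by omega) (by omega))]
        have hm1 : pvEndB s (m - 1) = true := by
          have h1 : s.getD (m - 1) ' ' = 'A' := hall (m - 1) (by omega) (by omega)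
          have h2 : m - 1 + 1 = m := by omega
          unfold pvEndB
          rw [h1]
          rcases hstop with hs | hs
          · have h3 : m - 1 = s.length - 1 := by omega
            simp [h3]
          · rw [h2]
            simp only [beq_self_eq_true, Bool.true_and, Bool.or_eq_true, beq_iff_eq,
              bne_iff_ne, ne_eq]
            exact Or.inr hs
        rw [show k + 1 * (m - 1 - k) = m - 1 by omega]
        simp [List.range', hm1]
      have hr1 : m - 1 + 1 = m := by omega
      rw [hr1]
      have hacc : pvOuterA s m ([] ++ [((k : Int), ((m - 1 : Nat) : Int))]) =
          [((k : Int), ((m - 1 : Nat) : Int))] ++ pvOuterA s m [] := by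
        rw [pvOuterA_eq_bgo s m _ hle, pvOuterA_eq_bgo s m [] hle]
        simp
      rw [hacc, pvOuterA_eq_zip s m hle (hstop.imp id Or.inl)]
      rw [hsplit, List.filter_append, List.filter_append, hS, hE]
      simp [List.zip_cons_cons]
    · -- name[k] ≠ 'A': position k contributes to neither boundary filter
      rw [pvOuterA]
      simp only [h, hA, dif_pos, if_neg, not_false_iff]
      rw [pvOuterA_eq_zip s (k + 1) (by omega)
        (Or.inr (Or.inr (Or.inr (by
          rw [show k + 1 - 1 = k by omega, hget]; exact hA))))]
      rw [show s.length - k = 1 + (s.length - (k + 1)) by omega, ← List.range'_append]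
      rw [List.filter_append, List.filter_append]
      have h1 : pvStartB s k = false := by
        unfold pvStartB
        rw [hget]
        simp [hA]
      have h2 : pvEndB s k = false := by
        unfold pvEndB
        rw [hget]
        simp [hA]
      rw [show k + 1 * 1 = k + 1 by omega]
      simp [List.range', h1, h2]
  · have hkk : k = s.length := by omega
    rw [pvOuterA]
    simp [hkk]
termination_by s.length - k
decreasing_by
  all_goals omega

theorem pvPorts_eq (name : String) :
    find_all_a_sequences name = find_all_a_sequences_alt name := by
  have hA' : pvOuterA name.toList 0 [] = pvBgo name.toList 0 [] none := by
    have h0 := pvOuterA_eq_bgo name.toList 0 [] (by omega)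
    simpa using h0
  have hB' : (((List.range name.toList.length).filter (pvStartB name.toList)).zip
        ((List.range name.toList.length).filter (pvEndB name.toList))).map
          (fun p => ((p.1 : Int), (p.2 : Int))) = pvBgo name.toList 0 [] none := by
    have h0 := pvOuterA_eq_zip name.toList 0 (by omega) (Or.inr (Or.inr (Or.inl rfl)))
    simp only [Nat.sub_zero] at h0
    rw [List.range_eq_range', ← h0, hA']
  have hS := pvBgo_structure name.toList 0 (by omega)
  simp only [List.drop_zero, Nat.cast_zero] at hS
  unfold find_all_a_sequences find_all_a_sequences_alt
  simp only []
  rw [hA', hB']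
  rcases hS with h0 | ⟨a, b, rest, heq, hab, hrest⟩
  · rw [h0]
    simp [PySem.List.pyGet?]
  · rw [heq]
    cases rest with
    | nil =>
      simp [PySem.List.pyGet?_neg_one]
    | cons q rest' =>
      have hlastmem : ((a, b) :: q :: rest').getLast (by simp) ∈ q :: rest' := by
        rw [List.getLast_cons (by simp)]
        exact List.getLast_mem (by simp)
      have hblt : b < (((a, b) :: q :: rest').getLast (by simp)).1 :=
        hrest _ hlastmem
      have hne : (a, b) ≠ ((a, b) :: q :: rest').getLast (by simp) := by
        intro hcon
        rw [← hcon] at hblt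
        simp at hblt
        omega
      have hglast : ((a, b) :: q :: rest').getLast? =
          some (((a, b) :: q :: rest').getLast (by simp)) :=
        List.getLast?_eq_some_getLast (by simp)
      rw [PySem.List.pyGet?_zero_cons, PySem.List.pyGet?_neg_one, hglast]
      simp only [List.headD_cons, List.getLastD_eq_getLast?, hglast, Option.getD_some,
        List.length_cons]
      by_cases hcond : a = 0 ∧
          (((a, b) :: q :: rest').getLast (by simp)).2 = (name.toList.length : Int) - 1
      · rw [if_pos (by exact hne), if_pos hcond, if_pos ⟨by omega, hcond.1, hcond.2⟩]
        simp [List.dropLast_cons₂]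
      · rw [if_pos (by exact hne), if_neg hcond, if_neg (by
          intro hcon
          exact hcond ⟨hcon.2.1, hcon.2.2⟩)]

-- ===== VERDICT (by name: the statement is the Claim_ definition above) =====
theorem find_all_a_sequences_spec : Claim_equal_find_all_a_sequences := by
  intro name _ _
  unfold Spec_find_all_a_sequences
  exact pvPorts_eq name
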